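-- pv_equiv track=rewrite | github.com/ASSERT-KTH/Mokav | experiments/pynguin/c4b/single-return/generated_tests/src_2123/1/src_2123.py | func
-- ===== SOURCE A (Python) =====
-- def func(*args):
--
-- 	n = int(args[0])
-- 	strstone = args[1]
-- 	stones = []
-- 	for i in strstone:
-- 	    stones.append(i)
-- 	to_remove = 0
-- 	position = 0
-- 	while (position < len(stones)):
-- 	    stone = stones[position]
-- 	    if (len(stones) == 1):
-- 	        break
-- 	    elif (position == 0):
-- 	        if (stones[(position + 1)] == stone):
-- 	            to_remove += 1
-- 	            stones.pop(position)
-- 	            position -= 1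
-- 	    elif (position == (len(stones) - 1)):
-- 	        if (stones[(position - 1)] == stone):
-- 	            to_remove += 1
-- 	            stones.pop(position)
-- 	            position -= 1
-- 	    elif (stones[(position + 1)] == stone):
-- 	        to_remove += 1
-- 	        stones.pop(position)
-- 	        position -= 1
-- 	    elif (stones[(position - 1)] == stone):
-- 	        to_remove += 1
-- 	        stones.pop(position)
-- 	        position -= 1
-- 	    position += 1
-- 	return(to_remove)
-- ===== SOURCE B (Python) =====
-- def func(*args):
--     n = int(args[0])
--     strstone = args[1]
--     return sum(1 for x, y in zip(strstone, strstone[1:]) if x == y)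
-- ===== Notes on version B (the rewrite author's own statement) =====
-- stated objective: faster
-- what changed: Replaced the list-mutating scan (repeated pop at the current position with index backtracking) by a single pass that counts adjacent equal character pairs, which is provably the same count.
import Mathlib
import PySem

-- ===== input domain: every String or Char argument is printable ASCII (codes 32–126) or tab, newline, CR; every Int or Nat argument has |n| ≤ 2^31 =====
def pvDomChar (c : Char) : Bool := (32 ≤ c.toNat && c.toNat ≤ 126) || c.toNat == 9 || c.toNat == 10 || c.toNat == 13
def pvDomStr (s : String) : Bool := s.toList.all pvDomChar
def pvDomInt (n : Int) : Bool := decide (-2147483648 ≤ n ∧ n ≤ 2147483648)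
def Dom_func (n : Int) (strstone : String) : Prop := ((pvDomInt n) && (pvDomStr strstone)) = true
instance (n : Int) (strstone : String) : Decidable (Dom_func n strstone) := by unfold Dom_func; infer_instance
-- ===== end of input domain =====

-- B replaces A's quadratic list-mutating scan (pop at current position, index backtracking)
-- by a single linear pass counting adjacent equal character pairs; same return value.


-- ===== PORT A =====
-- The while loop of A: `pos` is `position`; a pop followed by `position -= 1; position += 1`
-- is the recursive call with the popped list and the same/adjusted position, exactly as in A.
def loopA : Nat → List Char → Nat → Int → Int
  | 0, _, _, acc => acc
  | fuel + 1, stones, pos, acc =>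
    if pos < stones.length then
      if stones.length = 1 then acc
      else if pos = 0 then
        if stones.getD (pos + 1) ' ' = stones.getD pos ' ' then
          loopA fuel (stones.eraseIdx pos) pos (acc + 1)
        else loopA fuel stones (pos + 1) acc
      else if pos = stones.length - 1 then
        if stones.getD (pos - 1) ' ' = stones.getD pos ' ' then
          loopA fuel (stones.eraseIdx pos) pos (acc + 1)
        else loopA fuel stones (pos + 1) acc
      else if stones.getD (pos + 1) ' ' = stones.getD pos ' ' then
        loopA fuel (stones.eraseIdx pos) pos (acc + 1)
      else if stones.getD (pos - 1) ' ' = stones.getD pos ' ' then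
        loopA fuel (stones.eraseIdx pos) pos (acc + 1)
      else loopA fuel stones (pos + 1) acc
    else acc

def func (n : Int) (strstone : String) : Int :=
  let stones := strstone.toList.foldl (fun acc c => acc ++ [c]) ([] : List Char)
  loopA (2 * stones.length + 1) stones 0 0

-- ===== PORT B =====
def func_alt (n : Int) (strstone : String) : Int :=
  let l := strstone.toList
  (((l.zip l.tail).countP (fun p => p.1 == p.2) : Nat) : Int)

-- ===== PRECONDITION & SPEC =====
def Spec_func (n : Int) (strstone : String) (out : Int) : Prop := out = func_alt n strstone
instance (n : Int) (strstone : String) (out : Int) : Decidable (Spec_func n strstone out) := by unfold Spec_func; infer_instance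

-- ===== CLAIM (what is proved, stated in full; the proofs are below) =====
def Claim_equal_func : Prop := ∀ (n : Int) (strstone : String), Dom_func n strstone → Spec_func n strstone (func n strstone)

-- ===== LEMMAS AND PROOFS =====

/-- Number of adjacent equal pairs, recursively. -/
def pairs : List Char → Int
  | a :: b :: t => (if a = b then 1 else 0) + pairs (b :: t)
  | _ => 0

lemma build_eq (l acc : List Char) :
    l.foldl (fun acc c => acc ++ [c]) acc = acc ++ l := by
  induction l generalizing acc with
  | nil => simp
  | cons a t ih => simp [List.foldl, ih]

lemma countP_eq_pairs (l : List Char) :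
    (((l.zip l.tail).countP (fun p => p.1 == p.2) : Nat) : Int) = pairs l := by
  induction l with
  | nil => simp [pairs]
  | cons a t ih =>
    cases t with
    | nil => simp [pairs]
    | cons b t2 =>
      simp only [List.tail_cons, List.zip_cons_cons, List.countP_cons, pairs] at *
      rw [← ih]
      by_cases h : a = b <;> simp [h] <;> ring

lemma pairs_append_cc (pre : List Char) (c : Char) (rest : List Char) :
    pairs (pre ++ c :: c :: rest) = 1 + pairs (pre ++ c :: rest) := by
  induction pre with
  | nil => simp [pairs]
  | cons a pre ih =>
    cases pre with
    | nil => simp [pairs]; split_ifs <;> ring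
    | cons b pre2 =>
      simp only [List.cons_append, pairs] at *
      rw [ih]; ring

lemma pairs_zero (l : List Char)
    (h : ∀ i, i + 1 < l.length → l.getD i ' ' ≠ l.getD (i + 1) ' ') : pairs l = 0 := by
  induction l with
  | nil => simp [pairs]
  | cons a t ih =>
    cases t with
    | nil => simp [pairs]
    | cons b t2 =>
      have h0 := h 0 (by simp)
      simp [List.getD] at h0
      simp [pairs, h0]
      apply ih
      intro i hi
      have := h (i + 1) (by simp at hi ⊢; omega)
      simpa [List.getD] using this

lemma decomp (pos : Nat) : ∀ (l : List Char), pos + 1 < l.length →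
    l = l.take pos ++ l.getD pos ' ' :: l.getD (pos + 1) ' ' :: l.drop (pos + 2) := by
  induction pos with
  | zero =>
    intro l h
    match l, h with
    | a :: b :: t, _ => simp [List.getD]
  | succ p ih =>
    intro l h
    match l, h with
    | a :: t, h =>
      have h' : p + 1 < t.length := by simp at h; omega
      calc a :: t = a :: (t.take p ++ t.getD p ' ' :: t.getD (p + 1) ' ' :: t.drop (p + 2)) := by
            rw [← ih t h']
        _ = _ := by simp [List.getD]

lemma erase_decomp (l : List Char) (pos : Nat) (h : pos + 1 < l.length) :
    l.eraseIdx pos = l.take pos ++ l.getD (pos + 1) ' ' :: l.drop (pos + 2) := by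
  rw [List.eraseIdx_eq_take_drop_succ]
  congr 1
  rw [List.drop_eq_getElem_cons (by omega : pos + 1 < l.length)]
  rw [List.getD_eq_getElem l ' ' h]

lemma getD_eraseIdx_le (l : List Char) (pos j : Nat) (hj : j ≤ pos) (hp : pos + 1 < l.length) :
    (l.eraseIdx pos).getD j ' ' = if j < pos then l.getD j ' ' else l.getD (pos + 1) ' ' := by
  have hjl : j < (l.eraseIdx pos).length := by
    rw [List.length_eraseIdx, if_pos (by omega : pos < l.length)]; omega
  rw [List.getD_eq_getElem (l.eraseIdx pos) ' ' hjl, List.getElem_eraseIdx]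
  by_cases h : j < pos
  · rw [dif_pos h, if_pos h, List.getD_eq_getElem l ' ' (by omega : j < l.length)]
  · have hjp : j = pos := by omega
    subst hjp
    rw [dif_neg h, if_neg h, List.getD_eq_getElem l ' ' hp]

lemma loopA_eq (k : Nat) : ∀ (stones : List Char) (pos : Nat) (acc : Int),
    2 * stones.length - pos ≤ k →
    (∀ i, i + 1 ≤ pos → i + 1 < stones.length →
      stones.getD i ' ' ≠ stones.getD (i + 1) ' ') →
    loopA k stones pos acc = acc + pairs stones := by
  induction k with
  | zero =>
    intro stones pos acc hm hinv
    rw [show loopA 0 stones pos acc = acc from rfl,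
      pairs_zero stones (fun i hi => hinv i (by omega) hi)]
    ring
  | succ k ih =>
    intro stones pos acc hm hinv
    simp only [loopA]
    by_cases hlt : pos < stones.length
    · rw [if_pos hlt]
      have hlenE : (stones.eraseIdx pos).length = stones.length - 1 := by
        rw [List.length_eraseIdx, if_pos hlt]
      by_cases h1 : stones.length = 1
      · rw [if_pos h1]
        match stones, h1 with
        | [a], _ => simp [pairs]
      · rw [if_neg h1]
        have hlen2 : 2 ≤ stones.length := by omega
        by_cases h0 : pos = 0
        · subst h0
          rw [if_pos rfl]
          match stones, hlen2, hlenE, hlt, hm, hinv with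
          | a :: b :: t, _, hlenE, hlt, hm, hinv =>
            by_cases heq : b = a
            · subst heq
              rw [if_pos (by simp [List.getD])]
              rw [List.eraseIdx_cons_zero]
              rw [ih (b :: t) 0 (acc + 1) (by simp at hm ⊢; omega)
                (by intro i hi; omega)]
              simp [pairs]
              ring
            · rw [if_neg (by simpa [List.getD] using heq)]
              rw [ih (a :: b :: t) 1 acc (by simp at hm ⊢; omega)]
              intro i hi hlen
              have h0 : i = 0 := by omega
              subst h0
              simp only [List.getD_cons_zero, List.getD_cons_succ]
              exact fun h => heq h.symm
        · rw [if_neg h0]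
          have hpos1 : 1 ≤ pos := by omega
          have hprev : stones.getD (pos - 1) ' ' ≠ stones.getD pos ' ' := by
            have := hinv (pos - 1) (by omega) (by omega)
            have e : pos - 1 + 1 = pos := by omega
            rwa [e] at this
          by_cases hlast : pos = stones.length - 1
          · rw [if_pos hlast, if_neg hprev]
            rw [ih stones (pos + 1) acc (by omega)]
            intro i hi hlen
            by_cases hle : i + 1 ≤ pos
            · exact hinv i hle hlen
            · omega
          · rw [if_neg hlast]
            have hmid : pos + 1 < stones.length := by omega
            by_cases hnext : stones.getD (pos + 1) ' ' = stones.getD pos ' '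
            · rw [if_pos hnext]
              rw [ih (stones.eraseIdx pos) pos (acc + 1) (by rw [hlenE]; omega)]
              · have hd := decomp pos stones hmid
                have he := erase_decomp stones pos hmid
                rw [hnext] at hd he
                conv_rhs => rw [hd]
                rw [he, pairs_append_cc]
                ring
              · intro i hi hlen
                rw [getD_eraseIdx_le stones pos i (by omega) hmid,
                  getD_eraseIdx_le stones pos (i + 1) (by omega) hmid]
                by_cases hi1 : i + 1 < pos
                · rw [if_pos (by omega : i < pos), if_pos hi1]
                  exact hinv i (by omega) (by omega)
                · have hip : i + 1 = pos := by omega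
                  rw [if_pos (by omega : i < pos), hip, if_neg (lt_irrefl pos)]
                  rw [hnext, ← hip]
                  exact hinv i (by omega) (by omega)
            · rw [if_neg hnext, if_neg hprev]
              rw [ih stones (pos + 1) acc (by omega)]
              intro i hi hlen
              by_cases hle : i + 1 ≤ pos
              · exact hinv i hle hlen
              · have hip : i = pos := by omega
                subst hip
                exact fun h => hnext h.symm
    · rw [if_neg hlt, pairs_zero stones (fun i hi => hinv i (by omega) hi)]
      ring

-- ===== VERDICT (by name: the statement is the Claim_ definition above) =====
theorem func_spec : Claim_equal_func := by
  intro n strstone _hd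
  unfold Spec_func func func_alt
  simp only []
  rw [build_eq, List.nil_append]
  rw [loopA_eq (2 * strstone.toList.length + 1) strstone.toList 0 0 (by omega)
    (by intro i hi; omega)]
  rw [countP_eq_pairs]
  ring
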